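-- pv_equiv track=rewrite | github.com/Code-Institute-Submissions/ci-p3-pokemon-portfolio | run.py | increment_gsheet_column_value
-- ===== SOURCE A (Python) =====
-- def increment_gsheet_column_value(column):
--     """
--     Used to increment column values in gsheets.
--     Pass in A returns B
--     Pass in Z returns AA
--     Pass in GZ returns HA etc.
--
--     Parameters:
--         column (string): Column to be incremented
--     Returns:
--         incremented_col (string): Value of the next column
--
--     """
--     # use in the case where we reach Z and need to move to AA
--     if column == "":
--         return "A"
--
--     last_char_in_column = column[-1]
--     other_chars = column[:-1]
--
--     if last_char_in_column == "Z":
--         # call this function again passing in other_chars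
--         # to update the letters before the Z and change the Z to A
--         return increment_gsheet_column_value(other_chars) + "A"
--     else:
--         return other_chars + chr(ord(last_char_in_column) + 1)
-- ===== SOURCE B (Python) =====
-- def increment_gsheet_column_value(column):
--     chars = list(column)
--     i = len(chars) - 1
--     while i >= 0 and chars[i] == "Z":
--         chars[i] = "A"
--         i -= 1
--     if i < 0:
--         return "A" + "".join(chars)
--     chars[i] = chr(ord(chars[i]) + 1)
--     return "".join(chars)
-- ===== Notes on version B (the rewrite author's own statement) =====
-- stated objective: alternative
-- what changed: Replaces A's tail recursion (slicing off the last char and rebuilding strings per step) with a single iterative carry loop over a char list scanning from the right, with one join at the end.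
import Mathlib
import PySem

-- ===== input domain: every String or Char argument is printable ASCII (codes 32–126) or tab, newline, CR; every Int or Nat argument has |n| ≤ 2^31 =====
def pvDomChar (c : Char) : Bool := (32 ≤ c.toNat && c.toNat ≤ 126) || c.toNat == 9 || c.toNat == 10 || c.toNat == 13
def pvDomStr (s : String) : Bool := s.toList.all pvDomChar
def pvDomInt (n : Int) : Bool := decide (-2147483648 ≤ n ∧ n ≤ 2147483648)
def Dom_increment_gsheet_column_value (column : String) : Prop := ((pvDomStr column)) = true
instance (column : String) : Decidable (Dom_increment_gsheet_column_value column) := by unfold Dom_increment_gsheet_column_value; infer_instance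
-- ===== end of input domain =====

-- B replaces A's tail recursion over string slices with one iterative right-to-left carry loop over a char list; return values are proved equal on all of Dom.
-- ===== PORT A =====
-- recursion on the char list: column[-1] = getLast!, column[:-1] = dropLast, chr(ord c + 1) = Char.ofNat (c.toNat + 1)
def incA (cs : List Char) : List Char :=
  if h : cs = [] then ['A']
  else
    let last := cs.getLast h
    let other := cs.dropLast
    if last = 'Z' then incA other ++ ['A']
    else other ++ [Char.ofNat (last.toNat + 1)]
termination_by cs.length
decreasing_by simpa [List.length_dropLast] using Nat.sub_lt (List.length_pos_of_ne_nil h) one_pos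

def increment_gsheet_column_value (column : String) : String :=
  String.ofList (incA column.toList)

-- ===== PORT B =====
-- the while loop: walk the reversed char list, turning each trailing 'Z' into 'A' (kept in acc,
-- reversed order); on the first non-'Z' bump it and stop; if the list runs out, prepend 'A'.
def loopB : List Char → List Char → List Char
  | [], acc => acc ++ ['A']
  | c :: rest, acc =>
    if c = 'Z' then loopB rest (acc ++ ['A'])
    else acc ++ Char.ofNat (c.toNat + 1) :: rest

def increment_gsheet_column_value_alt (column : String) : String :=
  String.ofList (loopB column.toList.reverse []).reverse

-- ===== PRECONDITION & SPEC =====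
def Spec_increment_gsheet_column_value (column : String) (out : String) : Prop := out = increment_gsheet_column_value_alt column
instance (column : String) (out : String) : Decidable (Spec_increment_gsheet_column_value column out) := by unfold Spec_increment_gsheet_column_value; infer_instance

-- ===== CLAIM (what is proved, stated in full; the proofs are below) =====
def Claim_equal_increment_gsheet_column_value : Prop := ∀ (column : String), Dom_increment_gsheet_column_value column → Spec_increment_gsheet_column_value column (increment_gsheet_column_value column)

-- ===== LEMMAS AND PROOFS =====

theorem incA_concat (xs : List Char) (c : Char) :
    incA (xs ++ [c]) = if c = 'Z' then incA xs ++ ['A'] else xs ++ [Char.ofNat (c.toNat + 1)] := by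
  rw [incA]
  simp

theorem loopB_eq (rev acc : List Char) : loopB rev acc = acc ++ (incA rev.reverse).reverse := by
  induction rev generalizing acc with
  | nil => simp [loopB, incA]
  | cons c rest ih =>
    rw [loopB, List.reverse_cons, incA_concat]
    by_cases hc : c = 'Z' <;> simp [hc, ih]

-- ===== VERDICT (by name: the statement is the Claim_ definition above) =====
theorem increment_gsheet_column_value_spec : Claim_equal_increment_gsheet_column_value := by
  intro column _
  unfold Spec_increment_gsheet_column_value increment_gsheet_column_value increment_gsheet_column_value_alt
  rw [loopB_eq]
  simp
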